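-- pv_equiv track=rewrite | github.com/alecgunny/aoc | aoc/day7/__init__.py | solve
-- ===== SOURCE A (Python) =====
-- import operator
-- from collections.abc import Callable
-- from itertools import product
--
-- Operator = Callable[[int, int], int]
--
-- Equations = list[tuple[int, list[int]]]
--
-- def concat(a: int, b: int) -> int:
--     return a * 10**(len(str(b))) + b
--
-- def check_ops(target: int, inputs: list[int], ops: list[Operator]) -> bool:
--     value = inputs[0]
--     for i, op in enumerate(ops):
--         value = op(value, inputs[i + 1])
--     return value == target
--
-- def check_equation(target: int, inputs: list[int], ops: list[Operator]) -> bool: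
--     for ops in product(ops, repeat=len(inputs) - 1):
--         if check_ops(target, inputs, ops):
--             return True
--     return False
--
-- def solve(equations: Equations, include_concat: bool = False) -> int:
--     muladd = [operator.mul, operator.add]
--     output = 0
--     for target, inputs in equations:
--         if check_equation(target, inputs, [operator.mul, operator.add]):
--             output += target
--         elif include_concat and check_equation(target, inputs, muladd + [concat]):
--             output += target
--     return output
-- ===== SOURCE B (Python) =====
-- def solve(equations, include_concat=False):
--     # Forward reachable-value set DP instead of enumerating all operator tuples.
--     def reachable(inputs, with_concat):
--         vals = {inputs[0]}
--         for x in inputs[1:]: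
--             nxt = set()
--             for v in vals:
--                 nxt.add(v * x)
--                 nxt.add(v + x)
--                 if with_concat:
--                     nxt.add(v * 10 ** len(str(x)) + x)
--             vals = nxt
--         return vals
--
--     output = 0
--     for target, inputs in equations:
--         if target in reachable(inputs, False):
--             output += target
--         elif include_concat and target in reachable(inputs, True):
--             output += target
--     return output
-- ===== Notes on version B (the rewrite author's own statement) =====
-- stated objective: alternative
-- what changed: Replaces the enumeration of all k^(n-1) operator tuples (itertools.product + re-evaluation of each tuple) by a forward reachable-value set DP: one pass over the numbers maintaining the deduplicated set of values reachable so far, then a membership test of the target (intended as faster via deduplication; measured 4.85x at n=256 but both time out at n=1024, so not recorded as faster).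
-- outside the precondition, e.g. on solve([(5, [])], False): A raises ValueError, B raises IndexError
import Mathlib
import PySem

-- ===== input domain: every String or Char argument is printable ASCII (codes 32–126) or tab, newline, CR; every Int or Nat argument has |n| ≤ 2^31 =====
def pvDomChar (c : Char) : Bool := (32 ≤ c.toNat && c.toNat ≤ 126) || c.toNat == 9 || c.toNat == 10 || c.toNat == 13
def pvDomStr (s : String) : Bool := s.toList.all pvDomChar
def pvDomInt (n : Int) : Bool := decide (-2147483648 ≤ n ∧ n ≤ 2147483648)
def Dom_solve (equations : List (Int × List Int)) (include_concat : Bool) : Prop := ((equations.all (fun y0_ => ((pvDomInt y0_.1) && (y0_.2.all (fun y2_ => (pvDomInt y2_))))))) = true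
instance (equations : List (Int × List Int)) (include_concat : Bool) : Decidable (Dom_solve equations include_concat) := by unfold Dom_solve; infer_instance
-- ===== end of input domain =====

-- B replaces A's enumeration of all operator tuples (itertools.product) by a forward reachable-value set DP over the same numbers (a different algorithm of the same worst-case cost).

-- ===== PORT A =====
-- the three operators as a tag type (Python passes the functions themselves)
inductive Op | mul | add | cat
deriving DecidableEq, Repr

-- concat(a, b) = a * 10**(len(str(b))) + b
def concatI (a b : Int) : Int := a * 10 ^ (PySem.Int.toChars b).length + b

def applyOp (o : Op) (a b : Int) : Int :=
  match o with
  | .mul => a * b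
  | .add => a + b
  | .cat => concatI a b

-- itertools.product(ops, repeat=n): first factor varies slowest
def allTuples (ops : List Op) : Nat → List (List Op)
  | 0 => [[]]
  | n + 1 => ops.flatMap (fun o => (allTuples ops n).map (o :: ·))

-- check_ops; the index i+1 is in range on every call A makes (tuples have length len(inputs)-1)
def check_ops (target : Int) (inputs : List Int) (ops : List Op) : Bool :=
  ((PySem.List.enumerate ops).foldl
      (fun v p => applyOp p.2 v (PySem.List.pyGetD inputs (p.1 + 1) 0))
      (PySem.List.pyGetD inputs 0 0)) == target

def check_equation (target : Int) (inputs : List Int) (ops : List Op) : Bool :=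
  (allTuples ops (inputs.length - 1)).any (fun l => check_ops target inputs l)

def solve (equations : List (Int × List Int)) (include_concat : Bool) : Int :=
  equations.foldl
    (fun output p =>
      if check_equation p.1 p.2 [.mul, .add] then output + p.1
      else if include_concat && check_equation p.1 p.2 [.mul, .add, .cat] then output + p.1
      else output)
    0

-- ===== PORT B =====
-- set of values reachable from {inputs[0]} by folding the operators over inputs[1:]
def reachable (inputs : List Int) (with_concat : Bool) : PySem.Set Int :=
  (PySem.List.slice inputs (some 1) none).foldl
    (fun vals x =>
      vals.foldl
        (fun nxt v =>
          let nxt := PySem.Set.add nxt (v * x)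
          let nxt := PySem.Set.add nxt (v + x)
          if with_concat then PySem.Set.add nxt (v * 10 ^ (PySem.Int.toChars x).length + x) else nxt)
        PySem.Set.empty)
    (PySem.Set.ofList [PySem.List.pyGetD inputs 0 0])

def solve_alt (equations : List (Int × List Int)) (include_concat : Bool) : Int :=
  equations.foldl
    (fun output p =>
      if PySem.Set.contains (reachable p.2 false) p.1 then output + p.1
      else if include_concat && PySem.Set.contains (reachable p.2 true) p.1 then output + p.1
      else output)
    0

-- ===== PRECONDITION & SPEC =====
-- Pre_ excludes equations with an empty inputs list, on which A raises ValueError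
-- (itertools.product with repeat=-1) and B raises IndexError (inputs[0]).
def Pre_solve (equations : List (Int × List Int)) (include_concat : Bool) : Prop :=
  ∀ p ∈ equations, p.2 ≠ []

instance (equations : List (Int × List Int)) (include_concat : Bool) : Decidable (Pre_solve equations include_concat) := by unfold Pre_solve; infer_instance

def pvWitness_solve : (List (Int × List Int)) × Bool := ([(190, [10, 19]), (83, [17, 5])], true)

def Spec_solve (equations : List (Int × List Int)) (include_concat : Bool) (out : Int) : Prop := out = solve_alt equations include_concat
instance (equations : List (Int × List Int)) (include_concat : Bool) (out : Int) : Decidable (Spec_solve equations include_concat out) := by unfold Spec_solve; infer_instance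

-- ===== CLAIM (what is proved, stated in full; the proofs are below) =====
def Claim_equal_solve : Prop := ∀ (equations : List (Int × List Int)) (include_concat : Bool), Dom_solve equations include_concat → Pre_solve equations include_concat → Spec_solve equations include_concat (solve equations include_concat)

-- ===== LEMMAS AND PROOFS =====

-- the operator list B effectively uses on each of its two passes
def opsOf (w : Bool) : List Op := if w then [.mul, .add, .cat] else [.mul, .add]

-- semantic evaluation of an operator tuple zipped with the remaining numbers
def evalZip (v : Int) (l : List (Op × Int)) : Int :=
  l.foldl (fun v p => applyOp p.1 v p.2) v

-- A's indexed fold over enumerate equals the zip fold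
lemma check_ops_fold (v0 : Int) (l : List Op) (xs rest : List Int) (s : Nat) (v : Int)
    (hdrop : rest.drop s = xs) (hlen : l.length = xs.length) :
    (PySem.List.enumerate l (s : Int)).foldl
      (fun v p => applyOp p.2 v (PySem.List.pyGetD ((v0 :: rest : List Int)) (p.1 + 1) 0)) v
    = evalZip v (l.zip xs) := by
  induction l generalizing xs s v with
  | nil =>
    cases xs with
    | nil => simp [PySem.List.enumerate, evalZip]
    | cons x xs => simp at hlen
  | cons o l ih =>
    cases xs with
    | nil => simp at hlen
    | cons x xs =>
      have hx : rest.getD s 0 = x := by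
        have : s < rest.length := by
          have := congrArg List.length hdrop
          simp at this; omega
        rw [List.getD_eq_getElem _ _ this]
        have : (rest.drop s)[0]'(by simp [hdrop]) = x := by simp [hdrop]
        simpa using this
      have hget : PySem.List.pyGetD (v0 :: rest) ((s : Int) + 1) 0 = x := by
        have : ((s : Int) + 1) = ((s + 1 : Nat) : Int) := by push_cast; ring
        rw [this, PySem.List.pyGetD_natCast]
        simpa using hx
      rw [PySem.List.enumerate_cons]
      simp only [List.foldl_cons, hget]
      have hstep : ((s : Int) + 1) = ((s + 1 : Nat) : Int) := by push_cast; ring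
      rw [hstep, ih xs (s+1) (applyOp o v x) (by rw [← List.drop_drop]; simp [hdrop]) (by simpa using hlen)]
      simp [evalZip]

-- membership in itertools.product(ops, repeat=n)
lemma mem_allTuples (ops : List Op) (n : Nat) (l : List Op) :
    l ∈ allTuples ops n ↔ l.length = n ∧ ∀ o ∈ l, o ∈ ops := by
  induction n generalizing l with
  | zero => simp [allTuples]; rintro rfl; simp
  | succ n ih =>
    simp only [allTuples, List.mem_flatMap, List.mem_map]
    constructor
    · rintro ⟨o, ho, l', hl', rfl⟩
      rcases (ih l').1 hl' with ⟨hlen, hall⟩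
      refine ⟨by simp [hlen], ?_⟩
      intro x hx; rcases List.mem_cons.1 hx with rfl | hx
      · exact ho
      · exact hall x hx
    · rintro ⟨hlen, hall⟩
      cases l with
      | nil => simp at hlen
      | cons o l' =>
        refine ⟨o, hall o (by simp), l', (ih l').2 ⟨by simpa using hlen, ?_⟩, rfl⟩
        intro x hx; exact hall x (List.mem_cons_of_mem _ hx)

-- the three set insertions B makes for one (v, x) pair
lemma mem_gstep (w : Bool) (x t v : Int) (A : PySem.Set Int) :
    t ∈ (let nxt := PySem.Set.add A (v * x)
         let nxt := PySem.Set.add nxt (v + x)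
         if w then PySem.Set.add nxt (v * 10 ^ (PySem.Int.toChars x).length + x) else nxt)
    ↔ t ∈ A ∨ ∃ o ∈ opsOf w, t = applyOp o v x := by
  cases w <;>
    simp [PySem.Set.mem_add, opsOf, applyOp, concatI] <;> tauto

-- one step of B's set DP
lemma mem_step (w : Bool) (x t : Int) (S : List Int) :
    t ∈ S.foldl
        (fun nxt v =>
          let nxt := PySem.Set.add nxt (v * x)
          let nxt := PySem.Set.add nxt (v + x)
          if w then PySem.Set.add nxt (v * 10 ^ (PySem.Int.toChars x).length + x) else nxt)
        PySem.Set.empty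
    ↔ ∃ v ∈ S, ∃ o ∈ opsOf w, t = applyOp o v x := by
  have gen : ∀ (S : List Int) (A : PySem.Set Int),
      t ∈ S.foldl
        (fun nxt v =>
          let nxt := PySem.Set.add nxt (v * x)
          let nxt := PySem.Set.add nxt (v + x)
          if w then PySem.Set.add nxt (v * 10 ^ (PySem.Int.toChars x).length + x) else nxt)
        A
      ↔ t ∈ A ∨ ∃ v ∈ S, ∃ o ∈ opsOf w, t = applyOp o v x := by
    intro S
    induction S with
    | nil => simp
    | cons v S ih =>
      intro A
      simp only [List.foldl_cons]
      rw [ih]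
      rw [mem_gstep w x t v A]
      constructor
      · rintro ((h | h) | ⟨v', hv', h⟩)
        · exact Or.inl h
        · exact Or.inr ⟨v, by simp, h⟩
        · exact Or.inr ⟨v', by simp [hv'], h⟩
      · rintro (h | ⟨v', hv', h⟩)
        · exact Or.inl (Or.inl h)
        · rcases List.mem_cons.1 hv' with rfl | hv'
          · exact Or.inl (Or.inr h)
          · exact Or.inr ⟨v', hv', h⟩
  rw [gen]
  simp [PySem.Set.empty]

-- B's reachable-set fold characterised by operator tuples
lemma mem_reach (w : Bool) (xs : List Int) (S : PySem.Set Int) (t : Int) :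
    t ∈ xs.foldl
        (fun vals x =>
          vals.foldl
            (fun nxt v =>
              let nxt := PySem.Set.add nxt (v * x)
              let nxt := PySem.Set.add nxt (v + x)
              if w then PySem.Set.add nxt (v * 10 ^ (PySem.Int.toChars x).length + x) else nxt)
            PySem.Set.empty)
        S
    ↔ ∃ v ∈ S, ∃ l : List Op, l.length = xs.length ∧ (∀ o ∈ l, o ∈ opsOf w) ∧ evalZip v (l.zip xs) = t := by
  induction xs generalizing S with
  | nil =>
    simp [evalZip]
  | cons x xs ih =>
    simp only [List.foldl_cons]
    rw [ih]
    constructor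
    · rintro ⟨v', hv', l', hlen, hall, hval⟩
      rcases (mem_step w x v' S).1 hv' with ⟨v, hv, o, ho, rfl⟩
      refine ⟨v, hv, o :: l', by simp [hlen], ?_, ?_⟩
      · intro o' ho'; rcases List.mem_cons.1 ho' with rfl | ho'
        · exact ho
        · exact hall o' ho'
      · simpa [evalZip] using hval
    · rintro ⟨v, hv, l, hlen, hall, hval⟩
      cases l with
      | nil => simp at hlen
      | cons o l' =>
        refine ⟨applyOp o v x, (mem_step w x _ S).2 ⟨v, hv, o, hall o (by simp), rfl⟩,
          l', by simpa using hlen, fun o' ho' => hall o' (List.mem_cons_of_mem _ ho'), ?_⟩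
        simpa [evalZip] using hval

-- the per-equation booleans agree on a nonempty inputs list
lemma check_eq_contains (t : Int) (v0 : Int) (rest : List Int) (w : Bool) :
    check_equation t (v0 :: rest) (opsOf w) = PySem.Set.contains (reachable (v0 :: rest) w) t := by
  rw [Bool.eq_iff_iff]
  rw [PySem.Set.contains_iff]
  unfold check_equation reachable
  rw [List.any_eq_true]
  have hslice : PySem.List.slice (v0 :: rest) (some 1) none = rest := by
    simp [PySem.List.slice_from]
  have hget : PySem.List.pyGetD (v0 :: rest) (0 : Int) 0 = v0 := by
    have : ((0:Int)) = ((0:Nat):Int) := by norm_num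
    rw [this, PySem.List.pyGetD_natCast]; simp
  rw [hslice, hget]
  rw [mem_reach w rest (PySem.Set.ofList [v0]) t]
  constructor
  · rintro ⟨l, hl, hc⟩
    rcases (mem_allTuples _ _ l).1 hl with ⟨hlen, hall⟩
    simp only [List.length_cons, Nat.add_sub_cancel] at hlen
    unfold check_ops at hc
    have h0 := check_ops_fold v0 l rest rest 0 (PySem.List.pyGetD (v0 :: rest) 0 0) (by simp) hlen
    norm_cast at h0 hc
    rw [h0] at hc
    exact ⟨v0, by simp [PySem.Set.mem_ofList], l, hlen, hall, by simpa using hc⟩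
  · rintro ⟨v, hv, l, hlen, hall, hval⟩
    obtain rfl : v0 = v := by
      have := by simpa [PySem.Set.mem_ofList] using hv
      omega
    refine ⟨l, (mem_allTuples _ _ l).2 ⟨by simpa using hlen, hall⟩, ?_⟩
    unfold check_ops
    have h0 := check_ops_fold v0 l rest rest 0 (PySem.List.pyGetD (v0 :: rest) 0 0) (by simp) hlen
    norm_cast at h0
    rw [h0]
    simp [hget, hval]

-- ===== VERDICT (by name: the statement is the Claim_ definition above) =====
theorem solve_spec : Claim_equal_solve := by
  intro equations include_concat _ hpre
  unfold Spec_solve solve solve_alt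
  apply PySem.List.foldl_congr_mem
  intro acc p hp
  obtain ⟨t, inputs⟩ := p
  cases inputs with
  | nil => exact absurd rfl (hpre _ hp)
  | cons v0 rest =>
    have h1 : check_equation t (v0 :: rest) [.mul, .add] = PySem.Set.contains (reachable (v0 :: rest) false) t := by
      simpa [opsOf] using check_eq_contains t v0 rest false
    have h2 : check_equation t (v0 :: rest) [.mul, .add, .cat] = PySem.Set.contains (reachable (v0 :: rest) true) t := by
      simpa [opsOf] using check_eq_contains t v0 rest true
    simp only [h1, h2]
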